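-- pv_equiv track=rewrite | github.com/Valloric/MatchTagAlways | ftplugin/python/mta_core.py | LineColumnForOffsetInString
-- ===== SOURCE A (Python) =====
-- def LineColumnForOffsetInString( text, offset ):
--   current_offset = -1
--   current_line = 1
--   current_column = 0
--   for char in text:
--     current_offset += 1
--     current_column += 1
--     if char == '\n':
--       current_line += 1
--       current_column = 0
--       continue
--
--     if current_offset == offset:
--       return current_line, current_column
--   return None, None
-- ===== SOURCE B (Python) =====
-- def LineColumnForOffsetInString(text, offset):
--     if offset < 0 or offset >= len(text) or text[offset] == '\n':
--         return None, None
--     line = text.count('\n', 0, offset) + 1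
--     column = offset - text.rfind('\n', 0, offset)
--     return line, column
-- ===== Notes on version B (the rewrite author's own statement) =====
-- stated objective: simpler
-- what changed: Replaces the incremental character-by-character state machine with two guard checks plus two independent prefix scans: count('\n') for the line and rfind('\n') for the column.
import Mathlib
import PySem

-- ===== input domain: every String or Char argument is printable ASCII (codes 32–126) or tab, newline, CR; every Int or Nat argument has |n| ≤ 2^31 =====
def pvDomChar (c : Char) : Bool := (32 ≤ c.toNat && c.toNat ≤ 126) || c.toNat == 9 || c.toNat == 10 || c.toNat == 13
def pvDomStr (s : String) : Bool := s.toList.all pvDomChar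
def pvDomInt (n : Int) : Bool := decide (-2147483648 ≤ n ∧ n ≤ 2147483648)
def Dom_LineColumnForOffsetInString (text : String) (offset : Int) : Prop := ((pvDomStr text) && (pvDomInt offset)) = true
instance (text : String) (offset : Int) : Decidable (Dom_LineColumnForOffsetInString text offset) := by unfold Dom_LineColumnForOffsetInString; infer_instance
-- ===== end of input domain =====

-- B replaces A's incremental per-character state machine by guard checks plus two
-- independent prefix scans (newline count for the line, last-newline search for the
-- column); objective: simpler decomposition.

-- ===== PORT A =====
-- literal transliteration of A's for-loop with its three counters as state
def pvGoA : List Char → Int → Int → Int → Int → Option Int × Option Int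
  | [], _, _, _, _ => (none, none)
  | c :: rest, offset, current_offset, current_line, current_column =>
    let current_offset := current_offset + 1
    let current_column := current_column + 1
    if c = '\n' then
      pvGoA rest offset current_offset (current_line + 1) 0
    else if current_offset = offset then
      (some current_line, some current_column)
    else
      pvGoA rest offset current_offset current_line current_column

def LineColumnForOffsetInString (text : String) (offset : Int) : Option Int × Option Int :=
  pvGoA text.toList offset (-1) 1 0

-- ===== PORT B =====
-- port of Source B's text.count('\n', 0, offset) : number of newlines in the prefix
def pvCountNl : List Char → Int
  | [] => 0
  | c :: rest => (if c = '\n' then 1 else 0) + pvCountNl rest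

-- port of Source B's text.rfind('\n', 0, offset) : index of last newline in the prefix, -1 if none
def pvRfindNl : List Char → Int
  | [] => -1
  | c :: rest =>
    let r := pvRfindNl rest
    if r = -1 then (if c = '\n' then 0 else -1) else r + 1

def LineColumnForOffsetInString_alt (text : String) (offset : Int) : Option Int × Option Int :=
  let cs := text.toList
  if offset < 0 ∨ (cs.length : Int) ≤ offset ∨ cs.getD offset.toNat ' ' = '\n' then
    (none, none)
  else
    let pre := cs.take offset.toNat
    (some (pvCountNl pre + 1), some (offset - pvRfindNl pre))

-- ===== PRECONDITION & SPEC =====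
def Spec_LineColumnForOffsetInString (text : String) (offset : Int) (out : Option Int × Option Int) : Prop := out = LineColumnForOffsetInString_alt text offset
instance (text : String) (offset : Int) (out : Option Int × Option Int) : Decidable (Spec_LineColumnForOffsetInString text offset out) := by unfold Spec_LineColumnForOffsetInString; infer_instance

-- ===== CLAIM (what is proved, stated in full; the proofs are below) =====
def Claim_equal_LineColumnForOffsetInString : Prop := ∀ (text : String) (offset : Int), Dom_LineColumnForOffsetInString text offset → Spec_LineColumnForOffsetInString text offset (LineColumnForOffsetInString text offset)

-- ===== LEMMAS AND PROOFS =====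

theorem pvRfindNl_ge (cs : List Char) : -1 ≤ pvRfindNl cs := by
  induction cs with
  | nil => simp [pvRfindNl]
  | cons c rest ih =>
    simp only [pvRfindNl]
    split_ifs <;> omega

-- A's loop never matches once the target offset is at or before the current one
theorem pvGoA_none (cs : List Char) : ∀ (off co cl cc : Int), off ≤ co →
    pvGoA cs off co cl cc = (none, none) := by
  induction cs with
  | nil => intro off co cl cc _; rfl
  | cons c rest ih =>
    intro off co cl cc h
    simp only [pvGoA]
    split_ifs with hc hm
    · exact ih off (co + 1) (cl + 1) 0 (by omega)
    · omega
    · exact ih off (co + 1) cl (cc + 1) (by omega)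

-- invariant of A's loop, expressed through B's prefix scans
theorem pvCountNl_cons (c : Char) (rest : List Char) :
    pvCountNl (c :: rest) = (if c = '\n' then 1 else 0) + pvCountNl rest := rfl

theorem pvRfindNl_cons (c : Char) (rest : List Char) :
    pvRfindNl (c :: rest) =
      if pvRfindNl rest = -1 then (if c = '\n' then 0 else -1) else pvRfindNl rest + 1 := rfl

theorem pvGoA_main (cs : List Char) : ∀ (j : ℕ) (co cl cc : Int),
    pvGoA cs (co + 1 + j) co cl cc =
      if j < cs.length ∧ cs.getD j ' ' ≠ '\n' then
        (some (cl + pvCountNl (cs.take j)),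
         some (if pvRfindNl (cs.take j) = -1 then cc + j + 1
               else (j : Int) - pvRfindNl (cs.take j)))
      else (none, none) := by
  induction cs with
  | nil => intro j co cl cc; simp [pvGoA]
  | cons c rest ih =>
    intro j co cl cc
    cases j with
    | zero =>
      simp only [Nat.cast_zero, add_zero, pvGoA]
      by_cases hc : c = '\n'
      · rw [if_pos hc, pvGoA_none rest (co + 1) (co + 1) (cl + 1) 0 le_rfl]
        simp [hc]
      · rw [if_neg hc]
        simp [hc, pvCountNl, pvRfindNl]
    | succ k =>
      have hrge := pvRfindNl_ge (rest.take k)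
      have hiff : (k + 1 < (c :: rest).length ∧ (c :: rest).getD (k + 1) ' ' ≠ '\n') ↔
          (k < rest.length ∧ rest.getD k ' ' ≠ '\n') := by simp
      simp only [pvGoA]
      rw [show (co + 1 + ((k : ℕ) + 1 : ℕ) : Int) = (co + 1) + 1 + (k : ℕ) by push_cast; ring,
        List.take_succ_cons, pvCountNl_cons, pvRfindNl_cons]
      by_cases hc : c = '\n'
      · rw [if_pos hc, ih k (co + 1) (cl + 1) 0]
        by_cases hcnd : k < rest.length ∧ rest.getD k ' ' ≠ '\n'
        · rw [if_pos hcnd, if_pos (hiff.mpr hcnd)]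
          rw [if_pos hc]
          by_cases hr : pvRfindNl (rest.take k) = -1
          · rw [if_pos hr, if_pos hr, if_pos hc, if_neg (by omega : ¬ (0 : Int) = -1)]
            simp only [Prod.mk.injEq, Option.some.injEq]
            exact ⟨by ring, by push_cast; ring⟩
          · rw [if_neg hr, if_neg hr,
              if_neg (by omega : ¬ pvRfindNl (List.take k rest) + 1 = -1)]
            simp only [Prod.mk.injEq, Option.some.injEq]
            exact ⟨by ring, by push_cast; ring⟩
        · rw [if_neg hcnd, if_neg (fun h => hcnd (hiff.mp h))]
      · rw [if_neg hc, if_neg (show ¬ co + 1 = co + 1 + 1 + (k : ℕ) by omega),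
          ih k (co + 1) cl (cc + 1)]
        by_cases hcnd : k < rest.length ∧ rest.getD k ' ' ≠ '\n'
        · rw [if_pos hcnd, if_pos (hiff.mpr hcnd)]
          rw [if_neg hc]
          by_cases hr : pvRfindNl (rest.take k) = -1
          · rw [if_pos hr, if_pos hr, if_neg hc, if_pos rfl]
            simp only [Prod.mk.injEq, Option.some.injEq]
            exact ⟨by ring, by push_cast; ring⟩
          · rw [if_neg hr, if_neg hr,
              if_neg (by omega : ¬ pvRfindNl (List.take k rest) + 1 = -1)]
            simp only [Prod.mk.injEq, Option.some.injEq]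
            exact ⟨by ring, by push_cast; ring⟩
        · rw [if_neg hcnd, if_neg (fun h => hcnd (hiff.mp h))]

-- ===== VERDICT (by name: the statement is the Claim_ definition above) =====
theorem LineColumnForOffsetInString_spec : Claim_equal_LineColumnForOffsetInString := by
  intro text offset _
  unfold Spec_LineColumnForOffsetInString LineColumnForOffsetInString LineColumnForOffsetInString_alt
  by_cases hneg : offset < 0
  · rw [pvGoA_none text.toList offset (-1) 1 0 (by omega)]
    rw [if_pos (Or.inl hneg)]
  · have hmain := pvGoA_main text.toList offset.toNat (-1) 1 0
    rw [show ((-1 : Int) + 1 + (offset.toNat : ℕ)) = offset by omega] at hmain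
    rw [hmain]
    by_cases h : offset.toNat < text.toList.length ∧ text.toList.getD offset.toNat ' ' ≠ '\n'
    · rw [if_pos h]
      have hcond : ¬ (offset < 0 ∨ (text.toList.length : Int) ≤ offset ∨ text.toList.getD offset.toNat ' ' = '\n') := by
        rintro (h1 | h2 | h3)
        · omega
        · omega
        · exact h.2 h3
      rw [if_neg hcond]
      simp only [Prod.mk.injEq, Option.some.injEq]
      constructor
      · ring
      · by_cases hr : pvRfindNl (text.toList.take offset.toNat) = -1
        · rw [if_pos hr, hr]; omega
        · rw [if_neg hr]; omega
    · rw [if_neg h]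
      have hcond : offset < 0 ∨ (text.toList.length : Int) ≤ offset ∨ text.toList.getD offset.toNat ' ' = '\n' := by
        by_cases hl : offset.toNat < text.toList.length
        · right; right
          by_contra hnl
          exact h ⟨hl, hnl⟩
        · right; left; omega
      rw [if_pos hcond]
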